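-- pv_equiv track=rewrite | github.com/asthtls/coding_test | Programmers/lv0/조건에맞게수열변환하기2.py | solution
-- ===== SOURCE A (Python) =====
-- def solution(arr):
--     cnt = 0
--     while True:
--         res = []
--         changed = False
--         for n in arr:
--             if n >= 50 and n % 2 == 0:
--                 new_n = n // 2
--             elif n < 50 and n % 2 != 0:
--                 new_n = n * 2 + 1
--             else:
--                 new_n = n
--             res.append(new_n)
--             if new_n != n:
--                 changed = True
--         if not changed:
--             return cnt
--         arr = res
--         cnt += 1
-- ===== SOURCE B (Python) =====
-- def solution(arr):
--     best = 0
--     for n in arr: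
--         c = 0
--         while True:
--             if n >= 50 and n % 2 == 0:
--                 m = n // 2
--             elif n < 50 and n % 2 != 0:
--                 m = n * 2 + 1
--             else:
--                 m = n
--             if m == n:
--                 break
--             n = m
--             c += 1
--         best = max(best, c)
--     return best
-- ===== Notes on version B (the rewrite author's own statement) =====
-- stated objective: alternative
-- what changed: Replaces A's repeat-whole-array-passes-until-stable outer loop with an independent per-element convergence loop (counting each element's steps to its fixpoint) and a running max, using the fact that the pass count equals the maximum per-element step count.
import Mathlib
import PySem

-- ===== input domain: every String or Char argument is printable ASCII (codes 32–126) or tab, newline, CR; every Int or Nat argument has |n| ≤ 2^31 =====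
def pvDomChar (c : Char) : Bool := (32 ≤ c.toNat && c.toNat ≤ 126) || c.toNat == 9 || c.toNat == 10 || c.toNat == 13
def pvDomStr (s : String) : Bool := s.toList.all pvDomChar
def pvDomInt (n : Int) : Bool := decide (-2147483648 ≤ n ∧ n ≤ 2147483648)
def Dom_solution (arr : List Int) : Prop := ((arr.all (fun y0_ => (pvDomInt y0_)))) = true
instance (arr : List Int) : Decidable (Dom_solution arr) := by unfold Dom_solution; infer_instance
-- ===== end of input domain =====

-- B replaces A's repeat-full-passes-until-stable loop by an independent per-element
-- convergence loop plus a max reduction (alternative decomposition, same cost class).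

-- ===== PORT A =====
-- the per-element transform of A's inner for-body
def fA (n : Int) : Int :=
  if 50 ≤ n ∧ PySem.Int.mod n 2 = 0 then PySem.Int.floordiv n 2
  else if n < 50 ∧ PySem.Int.mod n 2 ≠ 0 then n * 2 + 1
  else n

-- one pass of A's while-body: builds res and the changed flag exactly as the for loop does
def passA (arr : List Int) : List Int × Bool :=
  arr.foldl (fun (acc : List Int × Bool) n =>
    let new_n := fA n
    (acc.1 ++ [new_n], acc.2 || decide (new_n ≠ n))) ([], false)

-- A's 'while True' with a fuel guard (fuel only makes the recursion total; on every
-- input satisfying Pre_solution the fuel is proved sufficient, so it never triggers)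
def loopA : Nat → List Int → Int → Int
  | 0, _, cnt => cnt
  | fuel + 1, arr, cnt =>
    let p := passA arr
    if p.2 then loopA fuel p.1 (cnt + 1) else cnt

def fuelA (arr : List Int) : Nat := arr.foldl (fun a n => a + n.natAbs) 0 + 10

def solution (arr : List Int) : Int := loopA (fuelA arr) arr 0

-- ===== PORT B =====
-- B's inner while loop: steps until the value stops changing, with a fuel guard
-- (n.natAbs + 10 is proved sufficient for every element admitted by Pre_solution)
def stepsB : Nat → Int → Int
  | 0, _ => 0
  | fuel + 1, n =>
    let m := if 50 ≤ n ∧ PySem.Int.mod n 2 = 0 then PySem.Int.floordiv n 2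
             else if n < 50 ∧ PySem.Int.mod n 2 ≠ 0 then n * 2 + 1
             else n
    if m = n then 0 else 1 + stepsB fuel m

def solution_alt (arr : List Int) : Int :=
  arr.foldl (fun best n => max best (stepsB (n.natAbs + 10) n)) 0

-- ===== PRECONDITION & SPEC =====
-- Pre_ excludes arrays containing an odd element ≤ -3: on those both A's pass loop and
-- B's per-element loop run forever (the value 2n+1 stays odd and below -1), so A never returns.
def Pre_solution (arr : List Int) : Prop :=
  ∀ n ∈ arr, PySem.Int.mod n 2 = 0 ∨ (-1 : Int) ≤ n
instance (arr : List Int) : Decidable (Pre_solution arr) := by unfold Pre_solution; infer_instance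

def pvWitness_solution : List Int := [98, 3, -4, -1, 51]

def Spec_solution (arr : List Int) (out : Int) : Prop := out = solution_alt arr
instance (arr : List Int) (out : Int) : Decidable (Spec_solution arr out) := by unfold Spec_solution; infer_instance

-- ===== CLAIM (what is proved, stated in full; the proofs are below) =====
def Claim_equal_solution : Prop := ∀ (arr : List Int), Dom_solution arr → Pre_solution arr → Spec_solution arr (solution arr)

-- ===== LEMMAS AND PROOFS =====

-- n is a fixpoint of the transform
def FixP (n : Int) : Prop := fA n = n

-- the chain from n is stable after k applications
def CvP (k : Nat) (n : Int) : Prop := FixP (fA^[k] n)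

-- element-wise precondition
def PreE (n : Int) : Prop := PySem.Int.mod n 2 = 0 ∨ (-1 : Int) ≤ n

-- bridge: divisor 2 is positive, so PySem mod/floordiv are Lean's % and /
theorem pmod2 (n : Int) : PySem.Int.mod n 2 = n % 2 :=
  PySem.Int.mod_eq_emod_of_pos (by norm_num)
theorem pdiv2 (n : Int) : PySem.Int.floordiv n 2 = n / 2 :=
  PySem.Int.floordiv_eq_ediv_of_pos (by norm_num)

theorem fA_eq (n : Int) : fA n =
    if 50 ≤ n ∧ n % 2 = 0 then n / 2
    else if n < 50 ∧ ¬ n % 2 = 0 then n * 2 + 1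
    else n := by
  simp only [fA, pmod2, pdiv2]

theorem stepsB_succ (fuel : Nat) (n : Int) :
    stepsB (fuel + 1) n = if fA n = n then 0 else 1 + stepsB fuel (fA n) := rfl

theorem Cv_step {k : Nat} {n : Int} (h : CvP k n) : CvP (k + 1) n := by
  unfold CvP FixP at *
  rw [Function.iterate_succ_apply', h]
  exact h

theorem Cv_mono {k k' : Nat} {n : Int} (h : CvP k n) (hle : k ≤ k') : CvP k' n := by
  induction hle with
  | refl => exact h
  | step _ ih => exact Cv_step ih

theorem Cv_succ_iff (k : Nat) (n : Int) : CvP (k + 1) n ↔ CvP k (fA n) := by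
  unfold CvP
  rw [Function.iterate_succ_apply]

theorem Cv_zero (n : Int) : CvP 0 n ↔ FixP n := by
  unfold CvP
  rw [Function.iterate_zero_apply]

theorem Fix_Cv {n : Int} (h : FixP n) (k : Nat) : CvP k n :=
  Cv_mono ((Cv_zero n).mpr h) (Nat.zero_le k)

-- PreE is preserved by one transform step
theorem preE_f {n : Int} (h : PreE n) : PreE (fA n) := by
  unfold PreE at *
  rw [pmod2] at *
  rw [fA_eq]
  split_ifs with h1 h2 <;> [right; right; exact h] <;> omega

-- odd n in [1,49] stabilises within 6 steps (finite check)
theorem conv_small_fin : ∀ m : Fin 50, (m : Nat) % 2 = 1 →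
    fA (fA^[6] ((m : Nat) : Int)) = fA^[6] ((m : Nat) : Int) := by decide

theorem conv_small {n : Int} (h1 : 1 ≤ n) (h2 : n < 50) (h3 : n % 2 = 1) : CvP 6 n := by
  have hm : ((⟨n.toNat, by omega⟩ : Fin 50) : Nat) = n.toNat := rfl
  have := conv_small_fin ⟨n.toNat, by omega⟩ (by omega)
  rw [hm] at this
  have hcast : ((n.toNat : Nat) : Int) = n := by omega
  rw [hcast] at this
  exact this

-- every element admitted by PreE stabilises within natAbs + 9 steps
theorem conv_aux : ∀ (N : Nat) (n : Int), n.natAbs ≤ N → PreE n → CvP (n.natAbs + 9) n := by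
  intro N
  induction N with
  | zero =>
    intro n hN _
    have : n = 0 := by omega
    subst this
    exact Fix_Cv (by rw [FixP, fA_eq]; norm_num) _
  | succ N ih =>
    intro n hN hp
    by_cases hfix : FixP n
    · exact Fix_Cv hfix _
    · rw [FixP, fA_eq] at hfix
      by_cases hbig : 50 ≤ n ∧ n % 2 = 0
      · -- halving branch
        have hf : fA n = n / 2 := by rw [fA_eq, if_pos hbig]
        have hp' : PreE (n / 2) := Or.inr (by omega)
        have hN' : (n / 2).natAbs ≤ N := by omega
        have := ih (n / 2) hN' hp'
        have h2 : CvP ((n / 2).natAbs + 9 + 1) n := by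
          rw [Cv_succ_iff, hf]; exact this
        exact Cv_mono h2 (by omega)
      · -- doubling or fixed branch
        have hodd : n < 50 ∧ ¬ n % 2 = 0 := by
          by_contra hc
          exact hfix (by rw [if_neg hbig, if_neg hc])
        have hn1 : 1 ≤ n := by
          rcases hp with he | hge
          · rw [pmod2] at he; omega
          · rcases eq_or_lt_of_le hge with he | _
            · exfalso
              apply hfix
              rw [if_neg hbig, if_pos hodd]
              omega
            · omega
        exact Cv_mono (conv_small hn1 hodd.1 (by omega)) (by omega)

theorem conv {n : Int} (hp : PreE n) : CvP (n.natAbs + 9) n :=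
  conv_aux n.natAbs n le_rfl hp

-- stepsB facts
theorem stepsB_nonneg : ∀ (fuel : Nat) (n : Int), 0 ≤ stepsB fuel n := by
  intro fuel
  induction fuel with
  | zero => intro n; simp [stepsB]
  | succ m ih =>
    intro n
    rw [stepsB_succ]
    split_ifs
    · exact le_refl 0
    · have := ih (fA n); omega

theorem stepsB_fix {n : Int} (h : FixP n) : ∀ fuel, stepsB fuel n = 0 := by
  intro fuel
  cases fuel with
  | zero => rfl
  | succ m => rw [stepsB_succ, if_pos (show fA n = n from h)]

theorem stepsB_agree_le : ∀ (f1 : Nat) (n : Int) (f2 : Nat),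
    CvP f1 n → f1 ≤ f2 → stepsB f1 n = stepsB f2 n := by
  intro f1
  induction f1 with
  | zero =>
    intro n f2 hc _
    rw [stepsB_fix ((Cv_zero n).mp hc) f2]; rfl
  | succ m ih =>
    intro n f2 hc hle
    obtain ⟨f2', rfl⟩ : ∃ k, f2 = k + 1 := ⟨f2 - 1, by omega⟩
    rw [stepsB_succ, stepsB_succ]
    by_cases hfix : fA n = n
    · rw [if_pos hfix, if_pos hfix]
    · rw [if_neg hfix, if_neg hfix,
        ih (fA n) f2' ((Cv_succ_iff m n).mp hc) (by omega)]

theorem stepsB_agree {f1 f2 : Nat} {n : Int} (h1 : CvP f1 n) (h2 : CvP f2 n) :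
    stepsB f1 n = stepsB f2 n := by
  rcases Nat.le_total f1 f2 with h | h
  · exact stepsB_agree_le f1 n f2 h1 h
  · exact (stepsB_agree_le f2 n f1 h2 h).symm

-- canonical per-element step count (the quantity B computes)
def S (n : Int) : Int := stepsB (n.natAbs + 10) n

theorem S_fix {n : Int} (h : FixP n) : S n = 0 := stepsB_fix h _

theorem Cv_self {n : Int} (hp : PreE n) (k : Nat) (hk : n.natAbs + 9 ≤ k) : CvP k n :=
  Cv_mono (conv hp) hk

theorem S_step {n : Int} (hp : PreE n) (hnf : ¬ FixP n) : S n = 1 + S (fA n) := by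
  have hc1 : CvP (n.natAbs + 9) (fA n) := by
    have := Cv_succ_iff (n.natAbs + 9) n
    exact Cv_mono (this.mp (Cv_mono (conv hp) (by omega))) (by omega)
  have hc2 : CvP ((fA n).natAbs + 10) (fA n) := Cv_mono (conv (preE_f hp)) (by omega)
  rw [S, show n.natAbs + 10 = (n.natAbs + 9) + 1 from rfl, stepsB_succ,
    if_neg (show ¬ fA n = n from hnf)]
  rw [stepsB_agree hc1 hc2]
  rfl

theorem S_pos {n : Int} (hp : PreE n) (hnf : ¬ FixP n) : 1 ≤ S n := by
  rw [S_step hp hnf]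
  have := stepsB_nonneg ((fA n).natAbs + 10) (fA n)
  unfold S
  omega

theorem S_nonneg (n : Int) : 0 ≤ S n := stepsB_nonneg _ n

theorem S_f {n : Int} (hp : PreE n) : S (fA n) = max (S n - 1) 0 := by
  by_cases hfix : FixP n
  · rw [hfix, S_fix hfix]; omega
  · rw [S_step hp hfix]
    have := S_nonneg (fA n)
    omega

-- characterisation of one pass of A
theorem passA_gen : ∀ (arr l0 : List Int) (b0 : Bool),
    arr.foldl (fun (acc : List Int × Bool) n =>
      let new_n := fA n
      (acc.1 ++ [new_n], acc.2 || decide (new_n ≠ n))) (l0, b0)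
    = (l0 ++ arr.map fA, b0 || arr.any (fun n => decide (fA n ≠ n))) := by
  intro arr
  induction arr with
  | nil => intro l0 b0; simp
  | cons x xs ih =>
    intro l0 b0
    simp only [List.foldl_cons, List.map_cons, List.any_cons, ih]
    simp [Bool.or_assoc]

theorem passA_eq (arr : List Int) :
    passA arr = (arr.map fA, arr.any (fun n => decide (fA n ≠ n))) := by
  have := passA_gen arr [] false
  simpa [passA] using this

-- foldl-max toolkit
theorem foldl_max_acc_le : ∀ (l : List Int) (a : Int), a ≤ l.foldl max a := by
  intro l
  induction l with
  | nil => intro a; simp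
  | cons x xs ih =>
    intro a
    exact le_trans (le_max_left a x) (ih (max a x))

theorem mem_le_foldl_max : ∀ (l : List Int) (a x : Int), x ∈ l → x ≤ l.foldl max a := by
  intro l
  induction l with
  | nil => intro a x h; simp at h
  | cons y ys ih =>
    intro a x h
    rcases List.mem_cons.mp h with rfl | h
    · exact le_trans (le_max_right a x) (foldl_max_acc_le ys _)
    · exact ih _ x h

theorem foldl_max_zero : ∀ (l : List Int), (∀ x ∈ l, x = 0) → l.foldl max 0 = 0 := by
  intro l
  induction l with
  | nil => intro _; rfl
  | cons x xs ih =>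
    intro h
    rw [List.foldl_cons, h x (by simp), max_self]
    exact ih (fun y hy => h y (by simp [hy]))

theorem foldl_max_shift : ∀ (l : List Int) (a : Int),
    (l.map (fun x => max (x - 1) 0)).foldl max (max (a - 1) 0)
      = max ((l.foldl max a) - 1) 0 := by
  intro l
  induction l with
  | nil => intro a; rfl
  | cons x xs ih =>
    intro a
    simp only [List.map_cons, List.foldl_cons]
    rw [show max (max (a - 1) 0) (max (x - 1) 0) = max ((max a x) - 1) 0 by omega]
    exact ih (max a x)

def maxS (arr : List Int) : Int := (arr.map S).foldl max 0

-- the heart: A's pass loop computes cnt + (max per-element step count)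
theorem loopA_eq : ∀ (fuel : Nat) (arr : List Int) (cnt : Int),
    (∀ n ∈ arr, PreE n) → (∀ n ∈ arr, CvP fuel n) →
    loopA fuel arr cnt = cnt + maxS arr := by
  intro fuel
  induction fuel with
  | zero =>
    intro arr cnt _ hc
    have : maxS arr = 0 := by
      apply foldl_max_zero
      intro x hx
      rcases List.mem_map.mp hx with ⟨n, hn, rfl⟩
      exact S_fix (hc n hn)
    rw [loopA, this, add_zero]
  | succ fuel ih =>
    intro arr cnt hp hc
    rw [loopA]
    rw [passA_eq]
    by_cases hch : arr.any (fun n => decide (fA n ≠ n)) = true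
    · simp only [hch, if_true]
      have hp' : ∀ m ∈ arr.map fA, PreE m := by
        intro m hm
        rcases List.mem_map.mp hm with ⟨n, hn, rfl⟩
        exact preE_f (hp n hn)
      have hc' : ∀ m ∈ arr.map fA, CvP fuel m := by
        intro m hm
        rcases List.mem_map.mp hm with ⟨n, hn, rfl⟩
        exact (Cv_succ_iff fuel n).mp (hc n hn)
      rw [ih (arr.map fA) (cnt + 1) hp' hc']
      have hmap : maxS (arr.map fA) = max (maxS arr - 1) 0 := by
        unfold maxS
        rw [List.map_map]
        have : arr.map (S ∘ fA) = (arr.map S).map (fun x => max (x - 1) 0) := by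
          rw [List.map_map]
          apply List.map_congr_left
          intro n hn
          exact S_f (hp n hn)
        rw [this]
        have h0 : (0 : Int) = max ((1:Int) - 1) 0 := by omega
        calc ((arr.map S).map (fun x => max (x - 1) 0)).foldl max 0
            = ((arr.map S).map (fun x => max (x - 1) 0)).foldl max (max ((0:Int) - 1) 0) := by norm_num
          _ = max (((arr.map S).foldl max 0) - 1) 0 := foldl_max_shift _ 0
      have hpos : 1 ≤ maxS arr := by
        rcases List.any_eq_true.mp hch with ⟨n, hn, hne⟩
        have hne' : ¬ FixP n := by simpa [FixP] using hne
        exact le_trans (S_pos (hp n hn) hne')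
          (mem_le_foldl_max (arr.map S) 0 (S n) (List.mem_map.mpr ⟨n, hn, rfl⟩))
      rw [hmap]
      omega
    · have hch' : (arr.any fun n => decide (fA n ≠ n)) = false := by
        simpa using hch
      simp only [hch', Bool.false_eq_true, if_false]
      have hz : maxS arr = 0 := by
        apply foldl_max_zero
        intro x hx
        rcases List.mem_map.mp hx with ⟨n, hn, rfl⟩
        apply S_fix
        have := List.any_eq_false.mp hch' n hn
        simpa [FixP] using this
      rw [hz, add_zero]

theorem solution_alt_eq (arr : List Int) : solution_alt arr = maxS arr := by
  unfold solution_alt maxS S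
  rw [List.foldl_map]

theorem sum_abs_acc_le : ∀ (l : List Int) (a : Nat), a ≤ l.foldl (fun a n => a + n.natAbs) a := by
  intro l
  induction l with
  | nil => intro a; simp
  | cons x xs ih =>
    intro a
    exact le_trans (Nat.le_add_right a x.natAbs) (ih _)

theorem mem_le_sum_abs : ∀ (l : List Int) (a : Nat) (n : Int), n ∈ l →
    n.natAbs ≤ l.foldl (fun a n => a + n.natAbs) a := by
  intro l
  induction l with
  | nil => intro a n h; simp at h
  | cons x xs ih =>
    intro a n h
    rcases List.mem_cons.mp h with rfl | h
    · exact le_trans (Nat.le_add_left n.natAbs a) (sum_abs_acc_le xs _)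
    · exact ih _ n h

-- ===== VERDICT (by name: the statement is the Claim_ definition above) =====
theorem solution_spec : Claim_equal_solution := by
  intro arr _ hpre
  unfold Spec_solution
  have hp : ∀ n ∈ arr, PreE n := fun n hn => hpre n hn
  have hc : ∀ n ∈ arr, CvP (fuelA arr) n := by
    intro n hn
    apply Cv_self (hp n hn)
    have := mem_le_sum_abs arr 0 n hn
    unfold fuelA
    omega
  rw [solution, loopA_eq (fuelA arr) arr 0 hp hc, solution_alt_eq, zero_add]
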